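-- pv_equiv track=rewrite | github.com/genioCE/project-vend | analysis-service/scripts/migrate_v5_to_v6.py | build_canonical_map
-- ===== SOURCE A (Python) =====
-- from collections import Counter
--
-- def build_canonical_map(
--     entity_counts: Counter[str],
--     type_map: dict[str, str],
-- ) -> dict[str, str]:
--     """Build normalized_lower -> canonical_name mapping."""
--     # Group entities by lowercase form
--     groups: dict[str, list[tuple[str, int]]] = {}
--     for entity, count in entity_counts.items():
--         key = entity.lower().strip()
--         if key not in groups:
--             groups[key] = []
--         groups[key].append((entity, count))
--
--     canonical: dict[str, str] = {}
--     for lower_key, variants in groups.items():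
--         etype = type_map.get(variants[0][0], "concept")
--
--         if etype == "spiritual":
--             # Canonical form for spiritual entities
--             if "god" in lower_key:
--                 canonical[lower_key] = "God"
--             elif "higher power" in lower_key:
--                 canonical[lower_key] = "Higher Power"
--             else:
--                 # Pick highest frequency
--                 best = max(variants, key=lambda x: x[1])
--                 canonical[lower_key] = best[0]
--         elif etype == "person":
--             # Title case for persons
--             best = max(variants, key=lambda x: x[1])
--             canonical[lower_key] = best[0]  # Keep the most common form
--         elif etype == "place":
--             best = max(variants, key=lambda x: x[1])
--             canonical[lower_key] = best[0]
--         elif etype == "organization":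
--             best = max(variants, key=lambda x: x[1])
--             canonical[lower_key] = best[0]
--         else:
--             # Concepts: prefer lowercase
--             if len(variants) == 1:
--                 canonical[lower_key] = variants[0][0]
--             else:
--                 # If there's a lowercase variant, prefer it
--                 lower_variants = [v for v in variants if v[0] == v[0].lower()]
--                 if lower_variants:
--                     canonical[lower_key] = max(lower_variants, key=lambda x: x[1])[0]
--                 else:
--                     canonical[lower_key] = max(variants, key=lambda x: x[1])[0]
--
--     return canonical
-- ===== SOURCE B (Python) =====
-- def build_canonical_map(entity_counts, type_map):
--     """Build normalized_lower -> canonical_name mapping (single-pass records)."""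
--     # key -> (first_entity, best_entity, best_count, lower_best_or_None, lower_best_count)
--     recs = {}
--     for entity, count in entity_counts.items():
--         key = entity.lower().strip()
--         low = entity if entity == entity.lower() else None
--         r = recs.get(key)
--         if r is None:
--             recs[key] = (entity, entity, count, low, count)
--         else:
--             first, best, bc, lbest, lc = r
--             if bc < count:
--                 best, bc = entity, count
--             if low is not None and (lbest is None or lc < count):
--                 lbest, lc = entity, count
--             recs[key] = (first, best, bc, lbest, lc)
--
--     canonical = {}
--     for key, (first, best, _bc, lbest, _lc) in recs.items():
--         etype = type_map.get(first, "concept")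
--         if etype == "spiritual":
--             if "god" in key:
--                 canonical[key] = "God"
--             elif "higher power" in key:
--                 canonical[key] = "Higher Power"
--             else:
--                 canonical[key] = best
--         elif etype in ("person", "place", "organization"):
--             canonical[key] = best
--         else:
--             canonical[key] = best if lbest is None else lbest
--     return canonical
-- ===== Notes on version B (the rewrite author's own statement) =====
-- stated objective: alternative
-- what changed: Instead of materializing per-key variant lists and re-scanning them with max()/filter in a second selection loop, B keeps a constant-size record per key (first entity, best entity/count, best lowercase entity/count) updated in one pass with strict-greater comparisons.
import Mathlib
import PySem

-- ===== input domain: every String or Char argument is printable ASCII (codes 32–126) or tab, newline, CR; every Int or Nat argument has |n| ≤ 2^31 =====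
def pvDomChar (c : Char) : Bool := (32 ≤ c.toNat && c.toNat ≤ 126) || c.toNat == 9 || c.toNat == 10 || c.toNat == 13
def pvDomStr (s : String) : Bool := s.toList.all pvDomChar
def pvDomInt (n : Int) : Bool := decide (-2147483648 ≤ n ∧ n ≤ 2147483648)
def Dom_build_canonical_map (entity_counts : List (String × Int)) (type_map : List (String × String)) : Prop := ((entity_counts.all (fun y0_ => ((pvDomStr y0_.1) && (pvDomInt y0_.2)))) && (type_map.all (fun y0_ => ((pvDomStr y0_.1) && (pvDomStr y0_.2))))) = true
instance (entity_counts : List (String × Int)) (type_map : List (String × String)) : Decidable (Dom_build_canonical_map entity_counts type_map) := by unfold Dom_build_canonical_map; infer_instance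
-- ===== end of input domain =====

-- B replaces A's per-key variant lists and second selection pass by a single pass keeping, per key,
-- the first entity, the best (entity, count) and the best lowercase (entity, count): same result, no materialized lists.

-- ===== PORT A =====
-- body of A's first loop: group entities by lowercase-stripped form
def bcmGroupStep (g : PySem.Dict String (List (String × Int))) (p : String × Int) :
    PySem.Dict String (List (String × Int)) :=
  let key := PySem.Str.strip (PySem.Str.lower p.1)
  let g := if g.contains key then g else g.insert key []
  g.insert key (g.getD key [] ++ [p])

-- body of A's second loop; variants is nonempty for every group, headD merely totalizes variants[0]
def bcmCanonStepA (type_map : List (String × String)) (c : PySem.Dict String String)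
    (kv : String × List (String × Int)) : PySem.Dict String String :=
  let lower_key := kv.1
  let variants := kv.2
  let etype := (PySem.Dict.ofList type_map).getD (variants.headD ("", 0)).1 "concept"
  if etype = "spiritual" then
    if PySem.Str.isIn "god" lower_key then c.insert lower_key "God"
    else if PySem.Str.isIn "higher power" lower_key then c.insert lower_key "Higher Power"
    else c.insert lower_key ((PySem.List.max? variants (fun x => x.2)).getD ("", 0)).1
  else if etype = "person" then
    c.insert lower_key ((PySem.List.max? variants (fun x => x.2)).getD ("", 0)).1
  else if etype = "place" then
    c.insert lower_key ((PySem.List.max? variants (fun x => x.2)).getD ("", 0)).1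
  else if etype = "organization" then
    c.insert lower_key ((PySem.List.max? variants (fun x => x.2)).getD ("", 0)).1
  else
    if variants.length = 1 then c.insert lower_key (variants.headD ("", 0)).1
    else
      let lower_variants := variants.filter (fun v => v.1 == PySem.Str.lower v.1)
      if lower_variants ≠ [] then
        c.insert lower_key ((PySem.List.max? lower_variants (fun x => x.2)).getD ("", 0)).1
      else c.insert lower_key ((PySem.List.max? variants (fun x => x.2)).getD ("", 0)).1

def build_canonical_map (entity_counts : List (String × Int)) (type_map : List (String × String)) :
    List (String × String) :=
  let groups := entity_counts.foldl bcmGroupStep PySem.Dict.empty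
  let canonical := groups.items.foldl (bcmCanonStepA type_map) PySem.Dict.empty
  canonical.items

-- ===== PORT B =====
-- per-key record: (first entity, best entity, best count, best lowercase entity?, its count)
abbrev BcmRec := String × String × Int × Option String × Int

def bcmUpdate (r : Option BcmRec) (e : String) (cnt : Int) : BcmRec :=
  let low : Option String := if e == PySem.Str.lower e then some e else none
  match r with
  | none => (e, e, cnt, low, cnt)
  | some (first, best, bc, lbest, lc) =>
    let bp := if bc < cnt then (e, cnt) else (best, bc)
    let lp := if low.isSome && (lbest.isNone || decide (lc < cnt)) then ((some e : Option String), cnt)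
              else (lbest, lc)
    (first, bp.1, bp.2, lp.1, lp.2)

def bcmRecStep (d : PySem.Dict String BcmRec) (p : String × Int) : PySem.Dict String BcmRec :=
  let key := PySem.Str.strip (PySem.Str.lower p.1)
  d.insert key (bcmUpdate (d.get? key) p.1 p.2)

def bcmCanonStepB (type_map : List (String × String)) (c : PySem.Dict String String)
    (kv : String × BcmRec) : PySem.Dict String String :=
  let key := kv.1
  match kv.2 with
  | (first, best, _, lbest, _) =>
    let etype := (PySem.Dict.ofList type_map).getD first "concept"
    if etype = "spiritual" then
      if PySem.Str.isIn "god" key then c.insert key "God"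
      else if PySem.Str.isIn "higher power" key then c.insert key "Higher Power"
      else c.insert key best
    else if etype = "person" ∨ etype = "place" ∨ etype = "organization" then c.insert key best
    else c.insert key (lbest.getD best)

def build_canonical_map_alt (entity_counts : List (String × Int)) (type_map : List (String × String)) :
    List (String × String) :=
  let recs := entity_counts.foldl bcmRecStep PySem.Dict.empty
  let canonical := recs.items.foldl (bcmCanonStepB type_map) PySem.Dict.empty
  canonical.items

-- ===== PRECONDITION & SPEC =====
def Spec_build_canonical_map (entity_counts : List (String × Int)) (type_map : List (String × String)) (out : List (String × String)) : Prop := out = build_canonical_map_alt entity_counts type_map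
instance (entity_counts : List (String × Int)) (type_map : List (String × String)) (out : List (String × String)) : Decidable (Spec_build_canonical_map entity_counts type_map out) := by unfold Spec_build_canonical_map; infer_instance

-- ===== CLAIM (what is proved, stated in full; the proofs are below) =====
def Claim_equal_build_canonical_map : Prop := ∀ (entity_counts : List (String × Int)) (type_map : List (String × String)), Dom_build_canonical_map entity_counts type_map → Spec_build_canonical_map entity_counts type_map (build_canonical_map entity_counts type_map)

-- ===== LEMMAS AND PROOFS =====

-- the record a variant list summarizes to (first / best / lowercase-best of the list)
def bcmFv (L : List (String × Int)) : BcmRec :=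
  match L with
  | [] => ("", "", 0, none, 0)
  | x :: xs => xs.foldl (fun r p => bcmUpdate (some r) p.1 p.2) (bcmUpdate none x.1 x.2)

def bcmFkv (kv : String × List (String × Int)) : String × BcmRec := (kv.1, bcmFv kv.2)

-- lowercase-best component of a record, as the (entity, count) pair it stands for
def bcmLp (r : BcmRec) : Option (String × Int) :=
  match r.2.2.2.1 with
  | some e => some (e, r.2.2.2.2)
  | none => none

theorem bcm_get?_map (l : List (String × List (String × Int))) (k : String) :
    (PySem.Dict.mk (l.map bcmFkv) : PySem.Dict String BcmRec).get? k
      = ((PySem.Dict.mk l).get? k).map bcmFv := by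
  induction l with
  | nil => rfl
  | cons kv t ih =>
    obtain ⟨k0, v0⟩ := kv
    simp only [List.map_cons, bcmFkv, PySem.Dict.get?_mk_cons]
    by_cases h : k0 == k
    · simp [h]
    · simp [h, ih]

theorem bcm_contains_map (l : List (String × List (String × Int))) (k : String) :
    (PySem.Dict.mk (l.map bcmFkv) : PySem.Dict String BcmRec).contains k
      = (PySem.Dict.mk l).contains k := by
  simp [PySem.Dict.contains, List.any_map, Function.comp_def, bcmFkv]

theorem bcmFv_append (L : List (String × Int)) (p : String × Int) (h : L ≠ []) :
    bcmFv (L ++ [p]) = bcmUpdate (some (bcmFv L)) p.1 p.2 := by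
  obtain ⟨x, xs, rfl⟩ := List.exists_cons_of_ne_nil h
  simp [bcmFv, List.foldl_append]

theorem bcm_max?_append (A : List (String × Int)) (y : String × Int) :
    PySem.List.max? (A ++ [y]) (fun v => v.2)
      = match PySem.List.max? A (fun v => v.2) with
        | none => some y
        | some m => if m.2 < y.2 then some y else some m := by
  rcases h : PySem.List.max? A (fun v => v.2) with _ | m <;>
    simp only [PySem.List.max?] at h ⊢ <;>
      rw [List.foldl_append, h] <;> rfl

theorem bcmUpdate_first (r : BcmRec) (e : String) (c : Int) :
    (bcmUpdate (some r) e c).1 = r.1 := by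
  obtain ⟨f, b, bc, lb, lc⟩ := r; simp [bcmUpdate]

theorem bcmUpdate_best (r : BcmRec) (e : String) (c : Int) :
    ((bcmUpdate (some r) e c).2.1, (bcmUpdate (some r) e c).2.2.1)
      = if r.2.2.1 < c then (e, c) else (r.2.1, r.2.2.1) := by
  obtain ⟨f, b, bc, lb, lc⟩ := r
  by_cases hb : bc < c <;> simp [bcmUpdate, hb]

theorem bcmLp_update (r : BcmRec) (e : String) (c : Int) :
    bcmLp (bcmUpdate (some r) e c)
      = if e == PySem.Str.lower e then
          match bcmLp r with
          | none => some (e, c)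
          | some m => if m.2 < c then some (e, c) else some m
        else bcmLp r := by
  obtain ⟨f, b, bc, lb, lc⟩ := r
  by_cases hl : e == PySem.Str.lower e
  · cases lb with
    | none => simp [bcmUpdate, bcmLp, hl]
    | some le =>
      by_cases hlt : lc < c <;> by_cases hb : bc < c <;> simp [bcmUpdate, bcmLp, hl, hlt, hb]
  · by_cases hb : bc < c <;> simp [bcmUpdate, bcmLp, hl, hb]

theorem bcm_first (L : List (String × Int)) (h : L ≠ []) :
    (bcmFv L).1 = (L.headD ("", 0)).1 := by
  induction L using List.reverseRecOn with
  | nil => exact absurd rfl h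
  | append_singleton t p ih =>
    rcases eq_or_ne t [] with rfl | ht
    · obtain ⟨e, c⟩ := p; simp [bcmFv, bcmUpdate]
    · obtain ⟨x, xs, rfl⟩ := List.exists_cons_of_ne_nil ht
      rw [bcmFv_append _ _ ht, bcmUpdate_first]
      simpa using ih ht

theorem bcm_best (L : List (String × Int)) (h : L ≠ []) :
    PySem.List.max? L (fun v => v.2) = some ((bcmFv L).2.1, (bcmFv L).2.2.1) := by
  induction L using List.reverseRecOn with
  | nil => exact absurd rfl h
  | append_singleton t p ih =>
    rcases eq_or_ne t [] with rfl | ht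
    · obtain ⟨e, c⟩ := p; simp [bcmFv, bcmUpdate, PySem.List.max?]
    · obtain ⟨e, c⟩ := p
      rw [bcm_max?_append, ih ht, bcmFv_append _ _ ht]
      have hb := bcmUpdate_best (bcmFv t) e c
      by_cases hlt : (bcmFv t).2.2.1 < c
      · rw [if_pos hlt] at hb
        rw [Prod.ext_iff] at hb
        dsimp only at hb
        simp [hlt]
        exact ⟨hb.1.symm, hb.2.symm⟩
      · rw [if_neg hlt] at hb
        rw [Prod.ext_iff] at hb
        dsimp only at hb
        simp [hlt]
        exact ⟨hb.1.symm, hb.2.symm⟩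

theorem bcm_lbest (L : List (String × Int)) :
    bcmLp (bcmFv L)
      = PySem.List.max? (L.filter (fun v => v.1 == PySem.Str.lower v.1)) (fun v => v.2) := by
  induction L using List.reverseRecOn with
  | nil => rfl
  | append_singleton t p ih =>
    rcases eq_or_ne t [] with rfl | ht
    · obtain ⟨e, c⟩ := p
      by_cases hl : e == PySem.Str.lower e <;>
        simp [bcmFv, bcmUpdate, bcmLp, hl, PySem.List.max?]
    · obtain ⟨e, c⟩ := p
      rw [bcmFv_append _ _ ht, bcmLp_update, List.filter_append, ih]
      by_cases hl : e == PySem.Str.lower e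
      · simp only [List.filter_cons, hl, ite_true, List.filter_nil, bcm_max?_append]
      · simp [hl]

-- one step of the two first loops preserves the item-wise relation
theorem bcm_step (gd : PySem.Dict String (List (String × Int))) (rd : PySem.Dict String BcmRec)
    (p : String × Int) (H : rd.items = gd.items.map bcmFkv) (Hne : ∀ kv ∈ gd.items, kv.2 ≠ []) :
    (bcmRecStep rd p).items = (bcmGroupStep gd p).items.map bcmFkv
      ∧ ∀ kv ∈ (bcmGroupStep gd p).items, kv.2 ≠ [] := by
  obtain ⟨e, cnt⟩ := p
  have hrd : rd = PySem.Dict.mk (gd.items.map bcmFkv) := PySem.Dict.ext H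
  set key := PySem.Str.strip (PySem.Str.lower e) with hkey
  have hget : rd.get? key = (gd.get? key).map bcmFv := by
    rw [hrd]; exact bcm_get?_map gd.items key
  have hcont : rd.contains key = gd.contains key := by
    rw [hrd]; exact bcm_contains_map gd.items key
  by_cases hc : gd.contains key = true
  · -- key already present: both sides overwrite the key's entry in place
    have hsome : ∃ L, gd.get? key = some L := by
      rw [PySem.Dict.contains_eq_isSome_get?] at hc
      exact Option.isSome_iff_exists.mp hc
    obtain ⟨L, hL⟩ := hsome
    have hLne : L ≠ [] := Hne _ (PySem.Dict.mem_items_of_get?_eq_some gd hL)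
    have hgetD : gd.getD key [] = L := PySem.Dict.getD_of_get?_eq_some gd [] hL
    have hA : (bcmGroupStep gd (e, cnt)) = gd.insert key (L ++ [(e, cnt)]) := by
      simp only [bcmGroupStep, ← hkey, hc, if_true, hgetD]
    have hB : (bcmRecStep rd (e, cnt)) = rd.insert key (bcmFv (L ++ [(e, cnt)])) := by
      simp only [bcmRecStep, ← hkey, hget, hL, Option.map_some]
      rw [bcmFv_append _ _ hLne]
    rw [hA, hB,
      PySem.Dict.items_insert_of_contains gd _ hc,
      PySem.Dict.items_insert_of_contains rd _ (hcont.trans hc), H,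
      List.map_map, List.map_map]
    constructor
    · apply List.map_congr_left
      intro q _
      by_cases hq : q.1 = key <;> simp [bcmFkv, hq]
    · intro kv hkv
      obtain ⟨q, hq, rfl⟩ := List.mem_map.mp hkv
      by_cases hqk : q.1 = key
      · simp [hqk, hLne]
      · simp only [hqk, beq_iff_eq, if_false]
        exact Hne _ hq
  · -- fresh key: both sides append a new entry
    have hc' : gd.contains key = false := by simpa using hc
    have hnone : gd.get? key = none := (PySem.Dict.get?_eq_none_iff_contains gd key).mpr hc'
    have hA : (bcmGroupStep gd (e, cnt)) = gd.insert key [(e, cnt)] := by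
      simp only [bcmGroupStep, ← hkey, hc', if_false, Bool.false_eq_true,
        PySem.Dict.getD_insert_self, List.nil_append]
      exact PySem.Dict.insert_insert_self gd key [] [(e, cnt)]
    have hB : (bcmRecStep rd (e, cnt)) = rd.insert key (bcmFv [(e, cnt)]) := by
      simp only [bcmRecStep, ← hkey, hget, hnone, Option.map_none]
      rfl
    rw [hA, hB,
      PySem.Dict.items_insert_of_not_contains gd _ hc',
      PySem.Dict.items_insert_of_not_contains rd _ (hcont.trans hc'), H, List.map_append]
    refine ⟨rfl, ?_⟩
    intro kv hkv
    rcases List.mem_append.mp hkv with hmem | hmem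
    · exact Hne _ hmem
    · simp only [List.mem_singleton] at hmem
      subst hmem
      simp

theorem bcm_phase1 (ec : List (String × Int)) (gd : PySem.Dict String (List (String × Int)))
    (rd : PySem.Dict String BcmRec)
    (H : rd.items = gd.items.map bcmFkv) (Hne : ∀ kv ∈ gd.items, kv.2 ≠ []) :
    (ec.foldl bcmRecStep rd).items = (ec.foldl bcmGroupStep gd).items.map bcmFkv
      ∧ ∀ kv ∈ (ec.foldl bcmGroupStep gd).items, kv.2 ≠ [] := by
  induction ec generalizing gd rd with
  | nil => exact ⟨H, Hne⟩
  | cons p rest ih =>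
    obtain ⟨H', Hne'⟩ := bcm_step gd rd p H Hne
    exact ih _ _ H' Hne'

-- the two second-loop bodies agree on a nonempty group and its summary record
theorem bcm_canon_step (tm : List (String × String)) (c : PySem.Dict String String)
    (kv : String × List (String × Int)) (h : kv.2 ≠ []) :
    bcmCanonStepA tm c kv = bcmCanonStepB tm c (bcmFkv kv) := by
  obtain ⟨k, L⟩ := kv
  simp only at h
  have hfirst := bcm_first L h
  have hbest := bcm_best L h
  have hlb := bcm_lbest L
  rcases hFv : bcmFv L with ⟨f, b, bc, lb, lc⟩
  rw [hFv] at hfirst hbest hlb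
  simp only at hfirst hbest hlb
  simp only [bcmCanonStepA, bcmCanonStepB, bcmFkv, hFv, ← hfirst]
  set etype := (PySem.Dict.ofList tm).getD f "concept" with hety
  by_cases e1 : etype = "spiritual"
  · simp only [e1, if_true, hbest, Option.getD_some]
  · by_cases e2 : etype = "person"
    · simp [e2, hbest]
    · by_cases e3 : etype = "place"
      · simp [e3, hbest]
      · by_cases e4 : etype = "organization"
        · simp [e4, hbest]
        · -- concept branch
          simp only [e1, e2, e3, e4, if_false, or_self]
          cases lb with
          | some le =>
            -- there is a lowercase variant; A's filter is nonempty and its max is (le, lc)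
            simp only [bcmLp] at hlb
            have hmem : (le, lc) ∈ L.filter (fun v => v.1 == PySem.Str.lower v.1) :=
              PySem.List.max?_mem hlb.symm
            have hfne : L.filter (fun v => v.1 == PySem.Str.lower v.1) ≠ [] :=
              List.ne_nil_of_mem hmem
            by_cases hlen : L.length = 1
            · obtain ⟨x, hx⟩ := List.length_eq_one_iff.mp hlen
              subst hx
              have : (le, lc) = x := by
                have := List.mem_filter.mp hmem
                simpa using this.1
              simp only [hlen, if_true]
              rw [hfirst, ← this]
              simp
            · simp [hlen, hfne, ← hlb]
          | none =>
            -- no lowercase variant: A falls back to the overall best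
            simp only [bcmLp] at hlb
            have hfnil : L.filter (fun v => v.1 == PySem.Str.lower v.1) = [] :=
              (PySem.List.max?_eq_none_iff _ _).mp hlb.symm
            by_cases hlen : L.length = 1
            · obtain ⟨x, hx⟩ := List.length_eq_one_iff.mp hlen
              subst hx
              have hx1 : PySem.List.max? [x] (fun v => v.2) = some x := by
                simp [PySem.List.max?]
              rw [hx1] at hbest
              simp only [Option.some_inj] at hbest
              simp only [hlen, if_true]
              rw [hfirst, hbest]
              simp
            · simp [hlen, hfnil, hbest]

-- ===== VERDICT (by name: the statement is the Claim_ definition above) =====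
theorem build_canonical_map_spec : Claim_equal_build_canonical_map := by
  intro ec tm _
  unfold Spec_build_canonical_map build_canonical_map build_canonical_map_alt
  dsimp only
  obtain ⟨H, Hne⟩ := bcm_phase1 ec PySem.Dict.empty PySem.Dict.empty (by rfl) (by intro kv hkv; cases hkv)
  rw [H, List.foldl_map]
  congr 1
  exact PySem.List.foldl_congr_mem _ _ _ _ (fun c kv hkv => bcm_canon_step tm c kv (Hne kv hkv))
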